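-- pv_equiv track=rewrite | github.com/MoatLab/FEMU | meson/mesonbuild/backend/vs2010backend.py | split_link_args
-- ===== SOURCE A (Python) =====
-- def split_link_args(args):
--     """
--     Split a list of link arguments into three lists:
--     * library search paths
--     * library filenames (or paths)
--     * other link arguments
--     """
--     lpaths = []
--     libs = []
--     other = []
--     for arg in args:
--         if arg.startswith('/LIBPATH:'):
--             lpath = arg[9:]
--             # De-dup library search paths by removing older entries when
--             # a new one is found. This is necessary because unlike other
--             # search paths such as the include path, the library is
--             # searched for in the newest (right-most) search path first.
--             if lpath in lpaths:
--                 lpaths.remove(lpath)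
--             lpaths.append(lpath)
--         elif arg.startswith(('/', '-')):
--             other.append(arg)
--         # It's ok if we miss libraries with non-standard extensions here.
--         # They will go into the general link arguments.
--         elif arg.endswith('.lib') or arg.endswith('.a'):
--             # De-dup
--             if arg not in libs:
--                 libs.append(arg)
--         else:
--             other.append(arg)
--     return lpaths, libs, other
-- ===== SOURCE B (Python) =====
-- def split_link_args(args):
--     """
--     Split a list of link arguments into three lists:
--     * library search paths
--     * library filenames (or paths)
--     * other link arguments
--     """
--     def is_lpath(a):
--         return a.startswith('/LIBPATH:')
--
--     def is_lib(a):
--         return not a.startswith(('/', '-')) and (a.endswith('.lib') or a.endswith('.a'))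
--
--     # Staged passes: one comprehension per category, then de-dup afterwards.
--     # lpaths keep the LAST occurrence (newest search path wins), realised by
--     # de-dupping the reversed list; libs keep the first occurrence.
--     lpaths = list(reversed(dict.fromkeys(reversed([a[9:] for a in args if is_lpath(a)]))))
--     libs = list(dict.fromkeys(a for a in args if is_lib(a)))
--     other = [a for a in args if not is_lpath(a) and not is_lib(a)]
--     return lpaths, libs, other
-- ===== Notes on version B (the rewrite author's own statement) =====
-- stated objective: alternative
-- what changed: A's single stateful loop with interleaved membership tests and removals is replaced by three independent filter passes (one per category with the same prefix/suffix precedence) followed by after-the-fact de-duplication: first occurrences for libs via dict.fromkeys, last occurrences for library paths via dict.fromkeys of the reversed list.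
import Mathlib
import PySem

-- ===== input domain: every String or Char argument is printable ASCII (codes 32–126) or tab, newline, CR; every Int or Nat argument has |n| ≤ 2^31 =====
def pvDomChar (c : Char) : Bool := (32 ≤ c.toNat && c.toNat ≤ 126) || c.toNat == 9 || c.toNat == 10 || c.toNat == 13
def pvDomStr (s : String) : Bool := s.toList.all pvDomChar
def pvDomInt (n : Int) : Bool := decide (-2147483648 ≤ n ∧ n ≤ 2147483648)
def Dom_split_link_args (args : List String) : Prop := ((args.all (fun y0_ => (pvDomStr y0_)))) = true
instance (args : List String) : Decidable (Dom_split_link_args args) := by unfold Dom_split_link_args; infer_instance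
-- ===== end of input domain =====

-- B replaces A's single stateful loop by three independent filter passes (one per
-- category) followed by after-the-fact de-duplication (first occurrence for libs,
-- last occurrence for library paths via dedup of the reversed list); same values.

-- ===== PORT A =====
-- one loop step of A; list.remove is guarded by the membership test, so it is List.erase (first occurrence)
def stepA (st : List String × List String × List String) (arg : String) :
    List String × List String × List String :=
  if PySem.Str.startswith arg "/LIBPATH:" then
    let lpath := PySem.Str.slice arg (some 9) none
    let lpaths := if lpath ∈ st.1 then st.1.erase lpath else st.1
    (lpaths ++ [lpath], st.2.1, st.2.2)
  else if PySem.Str.startswith arg "/" || PySem.Str.startswith arg "-" then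
    (st.1, st.2.1, st.2.2 ++ [arg])
  else if PySem.Str.endswith arg ".lib" || PySem.Str.endswith arg ".a" then
    (st.1, if arg ∈ st.2.1 then st.2.1 else st.2.1 ++ [arg], st.2.2)
  else
    (st.1, st.2.1, st.2.2 ++ [arg])

def split_link_args (args : List String) : List String × List String × List String :=
  args.foldl stepA ([], [], [])

-- ===== PORT B =====
def isLpathB (a : String) : Bool := PySem.Str.startswith a "/LIBPATH:"

def isLibB (a : String) : Bool :=
  !(PySem.Str.startswith a "/" || PySem.Str.startswith a "-") &&
  (PySem.Str.endswith a ".lib" || PySem.Str.endswith a ".a")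

-- three comprehensions (filter/map), then de-dup; list(dict.fromkeys(...)) is PySem.List.dedup
def split_link_args_alt (args : List String) : List String × List String × List String :=
  ((PySem.List.dedup ((args.filter isLpathB).map
      (fun a => PySem.Str.slice a (some 9) none)).reverse).reverse,
   PySem.List.dedup (args.filter isLibB),
   args.filter (fun a => !isLpathB a && !isLibB a))

-- ===== PRECONDITION & SPEC =====
def Spec_split_link_args (args : List String) (out : List String × List String × List String) : Prop := out = split_link_args_alt args
instance (args : List String) (out : List String × List String × List String) : Decidable (Spec_split_link_args args out) := by unfold Spec_split_link_args; infer_instance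

-- ===== CLAIM (what is proved, stated in full; the proofs are below) =====
def Claim_equal_split_link_args : Prop := ∀ (args : List String), Dom_split_link_args args → Spec_split_link_args args (split_link_args args)

-- ===== LEMMAS AND PROOFS =====

-- anything starting with '/LIBPATH:' starts with '/'
theorem sw_slash (a : String) (h : PySem.Str.startswith a "/LIBPATH:" = true) :
    PySem.Str.startswith a "/" = true := by
  simp [PySem.Str.startswith, PySem.Chars.startswith] at *
  obtain ⟨s, hs⟩ := h
  exact ⟨'L'::'I'::'B'::'P'::'A'::'T'::'H'::':'::s, by simpa using hs⟩

-- A's inline lpaths maintenance equals last-occurrence dedup, one append at a time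
theorem lpaths_step (l : List String) (x : String) :
    (if x ∈ (PySem.List.dedup l.reverse).reverse then ((PySem.List.dedup l.reverse).reverse).erase x
     else (PySem.List.dedup l.reverse).reverse) ++ [x]
      = (PySem.List.dedup (l ++ [x]).reverse).reverse := by
  simp only [PySem.List.dedup_eq_ofList, List.reverse_append, List.reverse_cons,
    List.reverse_nil, List.nil_append, List.singleton_append, PySem.Set.ofList_cons,
    PySem.Set.discard]
  rw [← List.filter_reverse]
  have hnd : (PySem.Set.ofList l.reverse).reverse.Nodup :=
    List.nodup_reverse.2 (PySem.Set.nodup_ofList _)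
  by_cases hx : x ∈ (PySem.Set.ofList l.reverse).reverse
  · rw [if_pos hx, hnd.erase_eq_filter]
    rfl
  · rw [if_neg hx, List.filter_eq_self.2]
    intro a ha
    exact bne_iff_ne.2 (fun h => hx (h ▸ ha))

-- A's inline libs dedup equals PySem.List.dedup, one append at a time
theorem libs_step (l : List String) (x : String) :
    (if x ∈ PySem.List.dedup l then PySem.List.dedup l else PySem.List.dedup l ++ [x])
      = PySem.List.dedup (l ++ [x]) := by
  simp only [PySem.List.dedup_eq_ofList, PySem.Set.ofList_append_singleton, PySem.Set.add]
  by_cases hx : x ∈ PySem.Set.ofList l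
  · rw [if_pos hx, if_pos ((PySem.Set.contains_iff _ _).2 hx)]
  · rw [if_neg hx, if_neg (fun h => hx ((PySem.Set.contains_iff _ _).1 h))]

-- the loop of A, started from de-dupped prefixes, ends at B's filtered-then-de-dupped lists
theorem loop_eq (args : List String) (lp lb ot : List String) :
    args.foldl stepA ((PySem.List.dedup lp.reverse).reverse, PySem.List.dedup lb, ot)
      = ((PySem.List.dedup (lp ++ (args.filter isLpathB).map
            (fun a => PySem.Str.slice a (some 9) none)).reverse).reverse,
         PySem.List.dedup (lb ++ args.filter isLibB),
         ot ++ args.filter (fun a => !isLpathB a && !isLibB a)) := by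
  induction args generalizing lp lb ot with
  | nil => simp
  | cons a t ih =>
    simp only [List.foldl_cons]
    by_cases h1 : PySem.Str.startswith a "/LIBPATH:"
    · have hlib : isLibB a = false := by
        unfold isLibB; rw [sw_slash a h1]; rfl
      have hlp : isLpathB a = true := h1
      simp only [stepA, h1, if_pos, List.filter_cons, hlp, hlib, Bool.not_true,
        Bool.false_and, ite_false, Bool.false_eq_true, List.map_cons]
      rw [lpaths_step]
      have := ih (lp ++ [PySem.Str.slice a (some 9) none]) lb ot
      simpa using this
    · by_cases h2 : (PySem.Str.startswith a "/" || PySem.Str.startswith a "-") = true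
      · have hlp : isLpathB a = false := by unfold isLpathB; exact Bool.eq_false_iff.2 h1
        have hlib : isLibB a = false := by unfold isLibB; rw [h2]; rfl
        simp only [stepA, h1, h2, Bool.false_eq_true, ite_false, ite_true,
          List.filter_cons, hlp, hlib, Bool.not_false, Bool.true_and]
        have := ih lp lb (ot ++ [a])
        simpa using this
      · by_cases h3 : (PySem.Str.endswith a ".lib" || PySem.Str.endswith a ".a") = true
        · have hlp : isLpathB a = false := by unfold isLpathB; exact Bool.eq_false_iff.2 h1
          have hlib : isLibB a = true := by
            unfold isLibB; rw [Bool.eq_false_iff.2 h2, h3]; rfl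
          simp only [stepA, h1, h2, h3, Bool.false_eq_true, ite_false, ite_true,
            List.filter_cons, hlp, hlib, Bool.not_true, Bool.and_false]
          rw [libs_step]
          have := ih lp (lb ++ [a]) ot
          simpa using this
        · have hlp : isLpathB a = false := by unfold isLpathB; exact Bool.eq_false_iff.2 h1
          have hlib : isLibB a = false := by
            unfold isLibB; rw [Bool.eq_false_iff.2 h3, Bool.and_false]
          simp only [stepA, h1, h2, h3, Bool.false_eq_true, ite_false,
            List.filter_cons, hlp, hlib, Bool.not_false, Bool.true_and]
          have := ih lp lb (ot ++ [a])
          simpa using this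

-- ===== VERDICT (by name: the statement is the Claim_ definition above) =====
theorem split_link_args_spec : Claim_equal_split_link_args := by
  intro args _
  show split_link_args args = split_link_args_alt args
  have h := loop_eq args [] [] []
  simpa [split_link_args, split_link_args_alt, PySem.List.dedup] using h
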